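-- pv_equiv track=rewrite | github.com/arieljarovisky/TPO-Algoritmos | functions.py | rankingFondos
-- ===== SOURCE A (Python) =====
-- def contadorFondos(origenes_fondos):
--     ahorro = 0
--     inversion = 0
--     ingresos = 0
--     alquileres = 0
--     herencia = 0
--     for origen in origenes_fondos:
--         if origen == "Ahorro":
--             ahorro += 1
--         elif origen == "Inversion":
--             inversion += 1
--         elif origen == "Ingresos":
--             ingresos += 1
--         elif origen == "Alquileres":
--             alquileres += 1
--         elif origen == "Herencia":
--             herencia += 1
--     return [ahorro, inversion, ingresos, alquileres, herencia]
--
-- def rankingFondos(origenes_fondos):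
--     contador = contadorFondos(origenes_fondos)
--     ranking = ["Ahorro", "Inversion", "Ingresos", "Alquileres", "Herencia"]
--     n = len(contador)
--     for i in range(n):
--         for j in range(0, n - i - 1):
--             if contador[j] < contador[j + 1]:
--                 contador[j], contador[j + 1] = contador[j + 1], contador[j]
--                 ranking[j], ranking[j + 1] = ranking[j + 1], ranking[j]
--     return ranking
-- ===== SOURCE B (Python) =====
-- def rankingFondos(origenes_fondos):
--     orden = ["Ahorro", "Inversion", "Ingresos", "Alquileres", "Herencia"]
--     conteo = {}
--     for origen in origenes_fondos:
--         conteo[origen] = conteo.get(origen, 0) + 1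
--     return sorted(orden, key=lambda o: -conteo.get(o, 0))
-- ===== Notes on version B (the rewrite author's own statement) =====
-- stated objective: simpler
-- what changed: Replaces the five parallel if/elif counters and the hand-written bubble sort on two parallel lists with a dict-accumulator count and a single stable sorted() call keyed by negated count (stability reproduces the strict-< bubble tie order).
import Mathlib
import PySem

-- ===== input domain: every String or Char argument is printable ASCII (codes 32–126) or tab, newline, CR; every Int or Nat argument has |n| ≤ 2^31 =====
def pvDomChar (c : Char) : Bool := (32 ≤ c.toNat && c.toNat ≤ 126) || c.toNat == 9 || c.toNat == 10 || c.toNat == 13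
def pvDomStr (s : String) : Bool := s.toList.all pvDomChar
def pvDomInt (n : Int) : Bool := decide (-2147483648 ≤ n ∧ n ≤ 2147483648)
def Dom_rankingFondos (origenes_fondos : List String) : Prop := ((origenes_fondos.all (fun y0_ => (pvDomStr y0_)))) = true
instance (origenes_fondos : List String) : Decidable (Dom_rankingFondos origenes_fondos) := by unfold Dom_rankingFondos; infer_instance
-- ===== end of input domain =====

-- B replaces the five if/elif counters and the hand-written bubble sort with a dict count
-- and one stable sorted() keyed by negated count (same result; objective: simpler).

-- ===== PORT A =====
def contStep (st : Int × Int × Int × Int × Int) (origen : String) : Int × Int × Int × Int × Int :=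
  if origen = "Ahorro" then (st.1 + 1, st.2.1, st.2.2.1, st.2.2.2.1, st.2.2.2.2)
  else if origen = "Inversion" then (st.1, st.2.1 + 1, st.2.2.1, st.2.2.2.1, st.2.2.2.2)
  else if origen = "Ingresos" then (st.1, st.2.1, st.2.2.1 + 1, st.2.2.2.1, st.2.2.2.2)
  else if origen = "Alquileres" then (st.1, st.2.1, st.2.2.1, st.2.2.2.1 + 1, st.2.2.2.2)
  else if origen = "Herencia" then (st.1, st.2.1, st.2.2.1, st.2.2.2.1, st.2.2.2.2 + 1)
  else st

def contadorFondos (origenes_fondos : List String) : List Int :=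
  let st := origenes_fondos.foldl contStep (0, 0, 0, 0, 0)
  [st.1, st.2.1, st.2.2.1, st.2.2.2.1, st.2.2.2.2]

-- the body of A's inner bubble loop: the simultaneous swap of contador[j],contador[j+1] and ranking[j],ranking[j+1]
def bubbleSwap (st2 : List Int × List String) (j : Int) : List Int × List String :=
  if PySem.List.pyGetD st2.1 j 0 < PySem.List.pyGetD st2.1 (j + 1) 0 then
    (PySem.List.pySetD (PySem.List.pySetD st2.1 j (PySem.List.pyGetD st2.1 (j + 1) 0)) (j + 1) (PySem.List.pyGetD st2.1 j 0),
     PySem.List.pySetD (PySem.List.pySetD st2.2 j (PySem.List.pyGetD st2.2 (j + 1) "")) (j + 1) (PySem.List.pyGetD st2.2 j ""))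
  else st2

def rankingFondos (origenes_fondos : List String) : List String :=
  let contador := contadorFondos origenes_fondos
  let ranking := ["Ahorro", "Inversion", "Ingresos", "Alquileres", "Herencia"]
  let n := PySem.List.len contador
  ((PySem.List.pyRange 0 n 1).foldl
    (fun st i => (PySem.List.pyRange 0 (n - i - 1) 1).foldl bubbleSwap st) (contador, ranking)).2

-- ===== PORT B =====
def rankingFondos_alt (origenes_fondos : List String) : List String :=
  let conteo := origenes_fondos.foldl (fun d origen => d.insert origen (d.getD origen 0 + 1))
    (PySem.Dict.empty : PySem.Dict String Int)
  PySem.List.sorted ["Ahorro", "Inversion", "Ingresos", "Alquileres", "Herencia"]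
    (fun o => -(conteo.getD o 0)) false

-- ===== PRECONDITION & SPEC =====
def Spec_rankingFondos (origenes_fondos : List String) (out : List String) : Prop := out = rankingFondos_alt origenes_fondos
instance (origenes_fondos : List String) (out : List String) : Decidable (Spec_rankingFondos origenes_fondos out) := by unfold Spec_rankingFondos; infer_instance

-- ===== CLAIM (what is proved, stated in full; the proofs are below) =====
def Claim_equal_rankingFondos : Prop := ∀ (origenes_fondos : List String), Dom_rankingFondos origenes_fondos → Spec_rankingFondos origenes_fondos (rankingFondos origenes_fondos)

-- ===== LEMMAS AND PROOFS =====

def ordenP : List String := ["Ahorro", "Inversion", "Ingresos", "Alquileres", "Herencia"]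

def cnts (xs : List String) : List Int :=
  [(xs.count "Ahorro" : Int), (xs.count "Inversion" : Int), (xs.count "Ingresos" : Int),
   (xs.count "Alquileres" : Int), (xs.count "Herencia" : Int)]

-- rank of x among l: how many elements of l are strictly smaller
def rk (l : List Int) (x : Int) : Nat := l.countP (fun y => decide (y < x))

def phi (l : List Int) (x : Int) : Int := (rk l x : Int)

def selfRk (l : List Int) : Bool := l.all (fun x => ((l.countP (fun y => decide (y < x)) : Int) == x))

def keyOf (r0 r1 r2 r3 r4 : Int) (o : String) : Int :=
  if o = "Ahorro" then -r0 else if o = "Inversion" then -r1 else if o = "Ingresos" then -r2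
  else if o = "Alquileres" then -r3 else -r4

def bubbleAll (c : List Int) : List String :=
  ((PySem.List.pyRange 0 5 1).foldl
    (fun st i => (PySem.List.pyRange 0 (5 - i - 1) 1).foldl bubbleSwap st) (c, ordenP)).2

-- counting loop of A computes the five counts
lemma contFold (xs : List String) : ∀ t : Int × Int × Int × Int × Int,
    xs.foldl contStep t =
      (t.1 + (xs.count "Ahorro" : Int), t.2.1 + (xs.count "Inversion" : Int),
       t.2.2.1 + (xs.count "Ingresos" : Int), t.2.2.2.1 + (xs.count "Alquileres" : Int),
       t.2.2.2.2 + (xs.count "Herencia" : Int)) := by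
  induction xs with
  | nil => intro t; simp
  | cons x xs ih =>
    intro t
    simp only [List.foldl_cons, List.count_cons]
    rw [ih]
    by_cases h1 : x = "Ahorro"
    · subst h1; simp [contStep]; omega
    · by_cases h2 : x = "Inversion"
      · subst h2; simp [contStep]; omega
      · by_cases h3 : x = "Ingresos"
        · subst h3; simp [contStep]; omega
        · by_cases h4 : x = "Alquileres"
          · subst h4; simp [contStep]; omega
          · by_cases h5 : x = "Herencia"
            · subst h5; simp [contStep]; omega
            · simp [contStep, h1, h2, h3, h4, h5]

lemma contador_eq (xs : List String) : contadorFondos xs = cnts xs := by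
  simp [contadorFondos, contFold xs (0, 0, 0, 0, 0), cnts]

-- rank lemmas
lemma countP_lt_strict {l : List Int} {x y : Int} (hx : x ∈ l) (hxy : x < y) :
    l.countP (fun z => decide (z < x)) < l.countP (fun z => decide (z < y)) := by
  induction l with
  | nil => simp at hx
  | cons h t ih =>
    simp only [List.countP_cons]
    rcases List.mem_cons.mp hx with rfl | hx'
    · have hm : t.countP (fun z => decide (z < x)) ≤ t.countP (fun z => decide (z < y)) := by
        apply List.countP_mono_left
        intro a _ ha
        simp only [decide_eq_true_eq] at *
        omega
      simp only [decide_eq_true_eq]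
      rw [if_neg (lt_irrefl x), if_pos hxy]
      omega
    · have hlt := ih hx'
      by_cases hh1 : h < x
      · have hh2 : h < y := lt_trans hh1 hxy
        simp only [decide_eq_true_eq]
        rw [if_pos hh1, if_pos hh2]; omega
      · by_cases hh2 : h < y
        · simp only [decide_eq_true_eq]; rw [if_neg hh1, if_pos hh2]; omega
        · simp only [decide_eq_true_eq]; rw [if_neg hh1, if_neg hh2]; omega

lemma rk_lt_length {l : List Int} {x : Int} (hx : x ∈ l) : rk l x < l.length := by
  unfold rk
  induction l with
  | nil => simp at hx
  | cons h t ih =>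
    simp only [List.countP_cons, List.length_cons]
    rcases List.mem_cons.mp hx with rfl | hx'
    · have := List.countP_le_length (p := fun z => decide (z < x)) (l := t)
      simp only [decide_eq_true_eq]
      rw [if_neg (lt_irrefl x)]; omega
    · have := ih hx'
      split <;> omega

lemma rk_iff {l : List Int} {x y : Int} (hy : y ∈ l) : rk l y < rk l x ↔ y < x := by
  constructor
  · intro hlt
    by_contra hn
    push_neg at hn
    have : l.countP (fun z => decide (z < x)) ≤ l.countP (fun z => decide (z < y)) := by
      apply List.countP_mono_left
      intro a _ ha
      simp only [decide_eq_true_eq] at *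
      omega
    unfold rk at hlt
    omega
  · exact countP_lt_strict hy

lemma phi_iff {l : List Int} {x y : Int} (hx : x ∈ l) (hy : y ∈ l) :
    (phi l x < phi l y ↔ x < y) := by
  unfold phi
  rw [Int.ofNat_lt]
  exact rk_iff hx

-- pySetD / pyGetD helpers
lemma pySetD_len {α : Type} (l : List α) (i : Int) (v : α) :
    (PySem.List.pySetD l i v).length = l.length := by
  unfold PySem.List.pySetD PySem.List.pySet?
  cases h : PySem.List.pyIdx? l.length i <;> simp [h]

lemma pySetD_map (f : Int → Int) (l : List Int) (i : Int) (v : Int) :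
    PySem.List.pySetD (l.map f) i (f v) = (PySem.List.pySetD l i v).map f := by
  unfold PySem.List.pySetD PySem.List.pySet?
  rw [List.length_map]
  cases h : PySem.List.pyIdx? l.length i <;> simp [List.map_set]

lemma pyGetD_map_int (f : Int → Int) (l : List Int) (j : Int) (h0 : 0 ≤ j)
    (h1 : j < (l.length : Int)) (d d' : Int) :
    PySem.List.pyGetD (l.map f) j d = f (PySem.List.pyGetD l j d') := by
  rw [PySem.List.pyGetD_eq_getElem (l.map f) d h0 (by simpa using h1),
      PySem.List.pyGetD_eq_getElem l d' h0 h1]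
  have : j.toNat < l.length := by omega
  simp [List.getElem_map]

lemma mem_pySetD {α : Type} {l : List α} {i : Int} {v x : α}
    (h : x ∈ PySem.List.pySetD l i v) : x = v ∨ x ∈ l := by
  unfold PySem.List.pySetD PySem.List.pySet? at h
  cases hk : PySem.List.pyIdx? l.length i <;> rw [hk] at h
  · simp only [Option.map_none, Option.getD_none] at h
    exact Or.inr h
  · simp only [Option.map_some, Option.getD_some] at h
    rcases List.mem_or_eq_of_mem_set h with h' | h'
    · exact Or.inr h'
    · exact Or.inl h'

-- one bubble step commutes with an order-preserving relabelling of the counters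
lemma swap_len (st : List Int × List String) (j : Int) :
    (bubbleSwap st j).1.length = st.1.length := by
  unfold bubbleSwap
  split <;> simp only [pySetD_len]

lemma swap_mem {c : List Int} {r : List String} {j : Int} (h0 : 0 ≤ j)
    (h1 : j + 1 < (c.length : Int)) {x : Int} (hx : x ∈ (bubbleSwap (c, r) j).1) : x ∈ c := by
  have hrj : PySem.Raise.InRange c.length j := by
    constructor <;> omega
  have hrj1 : PySem.Raise.InRange c.length (j + 1) := by
    constructor <;> omega
  unfold bubbleSwap at hx
  split at hx
  · simp only at hx
    rcases mem_pySetD hx with rfl | hx2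
    · exact PySem.List.pyGetD_mem c 0 hrj
    · rcases mem_pySetD hx2 with rfl | hx3
      · exact PySem.List.pyGetD_mem c 0 hrj1
      · exact hx3
  · exact hx

lemma swap_comm (f : Int → Int) (S : List Int)
    (hm : ∀ x ∈ S, ∀ y ∈ S, (f x < f y ↔ x < y))
    (c : List Int) (r : List String) (j : Int) (hc : ∀ x ∈ c, x ∈ S)
    (h0 : 0 ≤ j) (h1 : j + 1 < (c.length : Int)) :
    bubbleSwap (c.map f, r) j = ((bubbleSwap (c, r) j).1.map f, (bubbleSwap (c, r) j).2) := by
  have hrj : PySem.Raise.InRange c.length j := by constructor <;> omega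
  have hrj1 : PySem.Raise.InRange c.length (j + 1) := by constructor <;> omega
  have m0 : PySem.List.pyGetD c j 0 ∈ c := PySem.List.pyGetD_mem c 0 hrj
  have m1 : PySem.List.pyGetD c (j + 1) 0 ∈ c := PySem.List.pyGetD_mem c 0 hrj1
  have e1 : PySem.List.pyGetD (c.map f) j 0 = f (PySem.List.pyGetD c j 0) :=
    pyGetD_map_int f c j h0 (by omega) 0 0
  have e2 : PySem.List.pyGetD (c.map f) (j + 1) 0 = f (PySem.List.pyGetD c (j + 1) 0) :=
    pyGetD_map_int f c (j + 1) (by omega) (by omega) 0 0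
  by_cases hcond : PySem.List.pyGetD c j 0 < PySem.List.pyGetD c (j + 1) 0
  · have hcf : f (PySem.List.pyGetD c j 0) < f (PySem.List.pyGetD c (j + 1) 0) :=
      (hm _ (hc _ m0) _ (hc _ m1)).mpr hcond
    simp [bubbleSwap, e1, e2, hcond, hcf, pySetD_map]
  · have hcf : ¬ f (PySem.List.pyGetD c j 0) < f (PySem.List.pyGetD c (j + 1) 0) :=
      fun h => hcond ((hm _ (hc _ m0) _ (hc _ m1)).mp h)
    simp [bubbleSwap, e1, e2, hcond, hcf]

lemma foldInv (f : Int → Int) (S : List Int)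
    (hm : ∀ x ∈ S, ∀ y ∈ S, (f x < f y ↔ x < y)) (js : List Int) :
    ∀ (c : List Int) (r : List String),
      (∀ j ∈ js, 0 ≤ j ∧ j + 1 < (c.length : Int)) → (∀ x ∈ c, x ∈ S) →
      js.foldl bubbleSwap (c.map f, r)
          = ((js.foldl bubbleSwap (c, r)).1.map f, (js.foldl bubbleSwap (c, r)).2)
        ∧ (∀ x ∈ (js.foldl bubbleSwap (c, r)).1, x ∈ S)
        ∧ (js.foldl bubbleSwap (c, r)).1.length = c.length := by
  induction js with
  | nil =>
    intro c r _ hc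
    exact ⟨rfl, hc, rfl⟩
  | cons j js ih =>
    intro c r hb hc
    have hj := hb j (List.mem_cons_self)
    simp only [List.foldl_cons]
    have hsw := swap_comm f S hm c r j hc hj.1 hj.2
    have hlen : (bubbleSwap (c, r) j).1.length = c.length := swap_len (c, r) j
    have hmem' : ∀ x ∈ (bubbleSwap (c, r) j).1, x ∈ S :=
      fun x hx => hc _ (swap_mem hj.1 hj.2 hx)
    have hb' : ∀ jj ∈ js, 0 ≤ jj ∧ jj + 1 < ((bubbleSwap (c, r) j).1.length : Int) := by
      intro jj hjj
      have := hb jj (List.mem_cons_of_mem _ hjj)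
      rw [hlen]
      exact this
    obtain ⟨h1, h2, h3⟩ := ih (bubbleSwap (c, r) j).1 (bubbleSwap (c, r) j).2 hb' hmem'
    rw [hsw]
    refine ⟨?_, ?_, ?_⟩
    · rw [h1]
    · exact h2
    · rw [h3, hlen]

lemma outerInv (f : Int → Int) (S : List Int)
    (hm : ∀ x ∈ S, ∀ y ∈ S, (f x < f y ↔ x < y)) (is : List Int) :
    ∀ (c : List Int) (r : List String),
      (∀ i ∈ is, 0 ≤ i) → c.length = 5 → (∀ x ∈ c, x ∈ S) →
      is.foldl (fun st i => (PySem.List.pyRange 0 (5 - i - 1) 1).foldl bubbleSwap st) (c.map f, r)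
          = ((is.foldl (fun st i => (PySem.List.pyRange 0 (5 - i - 1) 1).foldl bubbleSwap st) (c, r)).1.map f,
             (is.foldl (fun st i => (PySem.List.pyRange 0 (5 - i - 1) 1).foldl bubbleSwap st) (c, r)).2)
        ∧ (∀ x ∈ (is.foldl (fun st i => (PySem.List.pyRange 0 (5 - i - 1) 1).foldl bubbleSwap st) (c, r)).1, x ∈ S)
        ∧ (is.foldl (fun st i => (PySem.List.pyRange 0 (5 - i - 1) 1).foldl bubbleSwap st) (c, r)).1.length = 5 := by
  induction is with
  | nil =>
    intro c r _ h5 hc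
    exact ⟨rfl, hc, h5⟩
  | cons i is ih =>
    intro c r hnn h5 hc
    have hi : (0 : Int) ≤ i := hnn i List.mem_cons_self
    simp only [List.foldl_cons]
    have hb : ∀ j ∈ PySem.List.pyRange 0 (5 - i - 1) 1, 0 ≤ j ∧ j + 1 < (c.length : Int) := by
      intro j hjm
      have := (PySem.List.mem_pyRange_one).mp hjm
      rw [h5]
      constructor <;> omega
    obtain ⟨h1, h2, h3⟩ := foldInv f S hm (PySem.List.pyRange 0 (5 - i - 1) 1) c r hb hc
    obtain ⟨g1, g2, g3⟩ := ih ((PySem.List.pyRange 0 (5 - i - 1) 1).foldl bubbleSwap (c, r)).1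
      ((PySem.List.pyRange 0 (5 - i - 1) 1).foldl bubbleSwap (c, r)).2
      (fun ii hii => hnn ii (List.mem_cons_of_mem _ hii)) (by rw [h3, h5]) h2
    rw [h1]
    refine ⟨?_, ?_, ?_⟩
    · rw [g1]
    · exact g2
    · exact g3

lemma ranking_eq_bubbleAll (xs : List String) : rankingFondos xs = bubbleAll (cnts xs) := by
  have hlen : PySem.List.len (cnts xs) = 5 := by
    simp [cnts, PySem.List.len_eq]
  show ((PySem.List.pyRange 0 (PySem.List.len (contadorFondos xs)) 1).foldl
      (fun st i => (PySem.List.pyRange 0 (PySem.List.len (contadorFondos xs) - i - 1) 1).foldl bubbleSwap st)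
      (contadorFondos xs, ["Ahorro", "Inversion", "Ingresos", "Alquileres", "Herencia"])).2 = _
  rw [contador_eq, hlen]
  rfl

lemma bubbleAll_rank (c : List Int) (h5 : c.length = 5) :
    bubbleAll (c.map (phi c)) = bubbleAll c := by
  have hm : ∀ x ∈ c, ∀ y ∈ c, (phi c x < phi c y ↔ x < y) :=
    fun x hx y hy => phi_iff hx hy
  have hnn : ∀ i ∈ PySem.List.pyRange 0 5 1, (0 : Int) ≤ i := by
    intro i hi
    exact ((PySem.List.mem_pyRange_one).mp hi).1
  obtain ⟨h1, _, _⟩ := outerInv (phi c) c hm (PySem.List.pyRange 0 5 1) c ordenP hnn h5 (fun x hx => hx)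
  unfold bubbleAll
  rw [h1]

lemma selfRk_map (c : List Int) : selfRk (c.map (phi c)) = true := by
  rw [selfRk, List.all_eq_true]
  intro x hx
  rcases List.mem_map.mp hx with ⟨u, hu, rfl⟩
  rw [beq_iff_eq]
  rw [List.countP_map]
  have hcong : c.countP ((fun y => decide (y < phi c u)) ∘ phi c) = c.countP (fun y => decide (y < u)) := by
    apply List.countP_congr
    intro y hy
    simp only [Function.comp_apply, decide_eq_true_eq]
    exact phi_iff hy hu
  rw [hcong]
  rfl

-- insertion sort only looks at comparisons between members
lemma insertBy_congr {α : Type} (b1 b2 : α → α → Bool) (x : α) (ys : List α)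
    (h : ∀ y ∈ ys, b1 x y = b2 x y) :
    PySem.List.insertBy b1 x ys = PySem.List.insertBy b2 x ys := by
  induction ys with
  | nil => rfl
  | cons y ys ih =>
    simp only [PySem.List.insertBy]
    rw [h y List.mem_cons_self]
    cases hb : b2 x y with
    | true => simp
    | false =>
      simp only [Bool.false_eq_true, reduceIte]
      rw [ih (fun z hz => h z (List.mem_cons_of_mem _ hz))]

lemma foldl_ib_congr {α : Type} (b1 b2 : α → α → Bool) (l : List α) :
    ∀ acc : List α, (∀ x ∈ l, ∀ y, (y ∈ acc ∨ y ∈ l) → b1 x y = b2 x y) →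
    l.foldl (fun a x => PySem.List.insertBy b1 x a) acc
      = l.foldl (fun a x => PySem.List.insertBy b2 x a) acc := by
  induction l with
  | nil => intro acc _; rfl
  | cons x l ih =>
    intro acc h
    simp only [List.foldl_cons]
    rw [insertBy_congr b1 b2 x acc
      (fun y hy => h x List.mem_cons_self y (Or.inl hy))]
    apply ih
    intro x' hx' y hy
    apply h x' (List.mem_cons_of_mem _ hx')
    rcases hy with hy | hy
    · rcases (PySem.List.mem_insertBy b2 x y acc).mp hy with rfl | hy'
      · exact Or.inr List.mem_cons_self
      · exact Or.inl hy'
    · exact Or.inr (List.mem_cons_of_mem _ hy)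

lemma sorted_congr (xs : List String) (k1 k2 : String → Int)
    (h : ∀ a ∈ xs, ∀ b ∈ xs, (k1 a < k1 b ↔ k2 a < k2 b)) :
    PySem.List.sorted xs k1 false = PySem.List.sorted xs k2 false := by
  rw [PySem.List.sorted_eq_foldl_insertBy, PySem.List.sorted_eq_foldl_insertBy]
  apply foldl_ib_congr
  intro a ha y hy
  rcases hy with hy | hy
  · simp at hy
  · exact decide_eq_decide.mpr (h a ha y hy)

lemma alt_eq (xs : List String) :
    rankingFondos_alt xs = PySem.List.sorted ordenP (fun o => -(xs.count o : Int)) false := by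
  unfold rankingFondos_alt ordenP
  simp only [PySem.Dict.getD_foldl_insert_add_one, PySem.Dict.getD_empty, zero_add]

set_option maxHeartbeats 8000000 in
set_option maxRecDepth 100000 in
lemma core : ∀ r0 r1 r2 r3 r4 : Fin 5,
    selfRk [(r0.val : Int), (r1.val : Int), (r2.val : Int), (r3.val : Int), (r4.val : Int)] = true →
    bubbleAll [(r0.val : Int), (r1.val : Int), (r2.val : Int), (r3.val : Int), (r4.val : Int)]
      = PySem.List.sorted ordenP
          (keyOf (r0.val : Int) (r1.val : Int) (r2.val : Int) (r3.val : Int) (r4.val : Int)) false := by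
  decide

-- ===== VERDICT (by name: the statement is the Claim_ definition above) =====
theorem rankingFondos_spec : Claim_equal_rankingFondos := by
  intro xs _
  show rankingFondos xs = rankingFondos_alt xs
  have m0 : (xs.count "Ahorro" : Int) ∈ cnts xs := by simp [cnts]
  have m1 : (xs.count "Inversion" : Int) ∈ cnts xs := by simp [cnts]
  have m2 : (xs.count "Ingresos" : Int) ∈ cnts xs := by simp [cnts]
  have m3 : (xs.count "Alquileres" : Int) ∈ cnts xs := by simp [cnts]
  have m4 : (xs.count "Herencia" : Int) ∈ cnts xs := by simp [cnts]
  have h5 : (cnts xs).length = 5 := by simp [cnts]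
  have hf0 : rk (cnts xs) (xs.count "Ahorro" : Int) < 5 := h5 ▸ rk_lt_length m0
  have hf1 : rk (cnts xs) (xs.count "Inversion" : Int) < 5 := h5 ▸ rk_lt_length m1
  have hf2 : rk (cnts xs) (xs.count "Ingresos" : Int) < 5 := h5 ▸ rk_lt_length m2
  have hf3 : rk (cnts xs) (xs.count "Alquileres" : Int) < 5 := h5 ▸ rk_lt_length m3
  have hf4 : rk (cnts xs) (xs.count "Herencia" : Int) < 5 := h5 ▸ rk_lt_length m4
  have hmap : (cnts xs).map (phi (cnts xs)) =
      [(rk (cnts xs) (xs.count "Ahorro" : Int) : Int),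
       (rk (cnts xs) (xs.count "Inversion" : Int) : Int),
       (rk (cnts xs) (xs.count "Ingresos" : Int) : Int),
       (rk (cnts xs) (xs.count "Alquileres" : Int) : Int),
       (rk (cnts xs) (xs.count "Herencia" : Int) : Int)] := by
    simp [cnts, phi]
  have hguard : selfRk
      [(rk (cnts xs) (xs.count "Ahorro" : Int) : Int),
       (rk (cnts xs) (xs.count "Inversion" : Int) : Int),
       (rk (cnts xs) (xs.count "Ingresos" : Int) : Int),
       (rk (cnts xs) (xs.count "Alquileres" : Int) : Int),
       (rk (cnts xs) (xs.count "Herencia" : Int) : Int)] = true := by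
    have := selfRk_map (cnts xs)
    rwa [hmap] at this
  have hcore : bubbleAll
      [(rk (cnts xs) (xs.count "Ahorro" : Int) : Int),
       (rk (cnts xs) (xs.count "Inversion" : Int) : Int),
       (rk (cnts xs) (xs.count "Ingresos" : Int) : Int),
       (rk (cnts xs) (xs.count "Alquileres" : Int) : Int),
       (rk (cnts xs) (xs.count "Herencia" : Int) : Int)]
      = PySem.List.sorted ordenP
        (keyOf (rk (cnts xs) (xs.count "Ahorro" : Int) : Int)
               (rk (cnts xs) (xs.count "Inversion" : Int) : Int)
               (rk (cnts xs) (xs.count "Ingresos" : Int) : Int)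
               (rk (cnts xs) (xs.count "Alquileres" : Int) : Int)
               (rk (cnts xs) (xs.count "Herencia" : Int) : Int)) false :=
    core ⟨_, hf0⟩ ⟨_, hf1⟩ ⟨_, hf2⟩ ⟨_, hf3⟩ ⟨_, hf4⟩ hguard
  have hkey : ∀ o ∈ ordenP,
      keyOf (rk (cnts xs) (xs.count "Ahorro" : Int) : Int)
            (rk (cnts xs) (xs.count "Inversion" : Int) : Int)
            (rk (cnts xs) (xs.count "Ingresos" : Int) : Int)
            (rk (cnts xs) (xs.count "Alquileres" : Int) : Int)
            (rk (cnts xs) (xs.count "Herencia" : Int) : Int) o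
        = -(phi (cnts xs) (xs.count o : Int)) := by
    intro o ho
    simp only [ordenP, List.mem_cons, List.not_mem_nil, or_false] at ho
    rcases ho with rfl | rfl | rfl | rfl | rfl <;> simp [keyOf, phi]
  have hmemc : ∀ o ∈ ordenP, (xs.count o : Int) ∈ cnts xs := by
    intro o ho
    simp only [ordenP, List.mem_cons, List.not_mem_nil, or_false] at ho
    rcases ho with rfl | rfl | rfl | rfl | rfl
    exacts [m0, m1, m2, m3, m4]
  have hk' : ∀ a ∈ ordenP, ∀ b ∈ ordenP,
      (keyOf (rk (cnts xs) (xs.count "Ahorro" : Int) : Int)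
             (rk (cnts xs) (xs.count "Inversion" : Int) : Int)
             (rk (cnts xs) (xs.count "Ingresos" : Int) : Int)
             (rk (cnts xs) (xs.count "Alquileres" : Int) : Int)
             (rk (cnts xs) (xs.count "Herencia" : Int) : Int) a
         < keyOf (rk (cnts xs) (xs.count "Ahorro" : Int) : Int)
             (rk (cnts xs) (xs.count "Inversion" : Int) : Int)
             (rk (cnts xs) (xs.count "Ingresos" : Int) : Int)
             (rk (cnts xs) (xs.count "Alquileres" : Int) : Int)
             (rk (cnts xs) (xs.count "Herencia" : Int) : Int) b
        ↔ -(xs.count a : Int) < -(xs.count b : Int)) := by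
    intro a ha b hb
    rw [hkey a ha, hkey b hb, neg_lt_neg_iff, neg_lt_neg_iff]
    exact phi_iff (hmemc b hb) (hmemc a ha)
  calc rankingFondos xs
      = bubbleAll (cnts xs) := ranking_eq_bubbleAll xs
    _ = bubbleAll ((cnts xs).map (phi (cnts xs))) := (bubbleAll_rank (cnts xs) h5).symm
    _ = PySem.List.sorted ordenP
          (keyOf (rk (cnts xs) (xs.count "Ahorro" : Int) : Int)
                 (rk (cnts xs) (xs.count "Inversion" : Int) : Int)
                 (rk (cnts xs) (xs.count "Ingresos" : Int) : Int)
                 (rk (cnts xs) (xs.count "Alquileres" : Int) : Int)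
                 (rk (cnts xs) (xs.count "Herencia" : Int) : Int)) false := by
        rw [hmap]; exact hcore
    _ = PySem.List.sorted ordenP (fun o => -(xs.count o : Int)) false :=
        sorted_congr ordenP _ _ hk'
    _ = rankingFondos_alt xs := (alt_eq xs).symm
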